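-- pv_equiv track=rewrite | github.com/bayramenes/data_compression | lzss.py | look_for_match
-- ===== SOURCE A (Python) =====
-- def look_for_match(search_buffer,lookahead):
--
--     run_length=0
--     offset = 0
--     i = 0
--     # note that i have used while loop rather than a for loop
--     # because i needed to be able to update the length that we are checking against
--     # which in our case is the length of the search buffer
--     # this is needed because in some cases lzss and lz77 allow for the offset to smaller than the run and encoding still works because
--     # we are contantly updating the search buffer which in return becomes longer and provided a new reference
--
-- # check for characters in the search buffer
--     while i < len(search_buffer):
--         # if there is a match between a character in the search buffer and the first character in the lookahead
--         # then we want to start a run looking if the next character of each matches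
--         if search_buffer[i] == lookahead[0]:
--             # set the offset
--             offset = len(search_buffer) - i
--             #
--             j = i
--             while (j < len(search_buffer)) and (j - i < len(lookahead)):
--                 if search_buffer[j] == lookahead[j-i]:
--                     search_buffer += search_buffer[j]
--                     run_length += 1
--                     j+=1
--                 else:
--                     break
--
--
--         # this is the main difference between lz77 and lzss
--         # lzss does not allow for run_length less than 3 because it is not efficient
--
--         # if a match was found then stop looking for other matches and return that
--         if run_length > 2:
--             break
--         else:
--             run_length=0
--             offset=0
--             break
--
--         i+=1
--
--     return run_length,offset
-- ===== SOURCE B (Python) =====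
-- def look_for_match(search_buffer, lookahead):
--     n = len(search_buffer)
--     if n == 0:
--         return 0, 0
--     if search_buffer[0] != lookahead[0]:
--         return 0, 0
--     run_length = 0
--     for j in range(len(lookahead)):
--         if lookahead[j] == search_buffer[j % n]:
--             run_length += 1
--         else:
--             break
--     return (run_length, n) if run_length > 2 else (0, 0)
-- ===== Notes on version B (the rewrite author's own statement) =====
-- stated objective: faster
-- what changed: A's outer scan (which always breaks after one iteration) and its self-growing search buffer (quadratic string re-concatenation) are replaced by a single forward scan of the lookahead compared against the fixed buffer via modulo indexing, using the fact that the grown buffer is a period-n repetition of the original.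
import Mathlib
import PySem

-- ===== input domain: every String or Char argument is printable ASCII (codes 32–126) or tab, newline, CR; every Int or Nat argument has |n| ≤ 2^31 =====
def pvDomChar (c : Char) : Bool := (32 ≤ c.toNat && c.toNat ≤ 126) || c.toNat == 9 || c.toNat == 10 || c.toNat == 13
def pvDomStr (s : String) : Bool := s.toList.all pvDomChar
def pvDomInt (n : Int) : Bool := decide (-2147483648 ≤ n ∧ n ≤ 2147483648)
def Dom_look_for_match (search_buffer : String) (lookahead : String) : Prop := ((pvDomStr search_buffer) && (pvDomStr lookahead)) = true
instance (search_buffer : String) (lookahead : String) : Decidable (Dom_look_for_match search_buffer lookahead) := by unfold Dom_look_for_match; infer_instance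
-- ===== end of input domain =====

-- B replaces A's self-growing search buffer (quadratic string appends) and degenerate outer scan by one
-- modulo-indexed forward scan of the lookahead; objective: faster (linear vs quadratic in the run), measured.

-- ===== PORT A =====
-- inner while loop of A: state (search_buffer, j, run_length); the buffer grows by the matched
-- character on each match.  i is the (fixed) outer index.  In-range accesses only on admitted
-- inputs, so getD with a dummy default is exact there.
def lfmInner (sb : List Char) (la : List Char) (i : Nat) (j : Nat) (run : Nat) :
    Nat × List Char :=
  if _h : j < sb.length ∧ j - i < la.length then
    if sb.getD j ' ' == la.getD (j - i) ' ' then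
      lfmInner (sb ++ [sb.getD j ' ']) la i (j + 1) (run + 1)
    else (run, sb)
  else (run, sb)
termination_by (la.length + i) - j
decreasing_by omega

def look_for_match (search_buffer : String) (lookahead : String) : Int × Int :=
  let sb := search_buffer.toList
  let la := lookahead.toList
  let run : Nat := 0
  let offset : Nat := 0
  let i : Nat := 0
  -- while i < len(search_buffer): both branches of the trailing if break, so the body runs once
  if i < sb.length then
    let (run, offset) :=
      if sb.getD i ' ' == la.getD 0 ' ' then
        let offset := sb.length - i
        ((lfmInner sb la i i run).1, offset)
      else (run, offset)
    if run > 2 then ((run : Int), (offset : Int)) else (0, 0)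
  else ((run : Int), (offset : Int))

-- ===== PORT B =====
-- for j in range(len(lookahead)): compare lookahead[j] with search_buffer[j % n], break on mismatch
def altRun (sb : List Char) (la : List Char) (n : Nat) (j : Nat) (run : Nat) : Nat :=
  if _h : j < la.length then
    if la.getD j ' ' == sb.getD (j % n) ' ' then altRun sb la n (j + 1) (run + 1)
    else run
  else run
termination_by la.length - j
decreasing_by omega

def look_for_match_alt (search_buffer : String) (lookahead : String) : Int × Int :=
  let sb := search_buffer.toList
  let la := lookahead.toList
  let n := sb.length
  if n = 0 then (0, 0)
  else if sb.getD 0 ' ' != la.getD 0 ' ' then (0, 0)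
  else
    let run := altRun sb la n 0 0
    if run > 2 then ((run : Int), (n : Int)) else (0, 0)

-- ===== PRECONDITION & SPEC =====
-- Pre_ excludes only inputs where A (and B) raise IndexError: a non-empty search buffer with an
-- empty lookahead (lookahead[0] is accessed).
def Pre_look_for_match (search_buffer : String) (lookahead : String) : Prop :=
  search_buffer = "" ∨ lookahead ≠ ""
instance (search_buffer : String) (lookahead : String) : Decidable (Pre_look_for_match search_buffer lookahead) := by unfold Pre_look_for_match; infer_instance

def pvWitness_look_for_match : String × String := ("abc", "abcab")

def Spec_look_for_match (search_buffer : String) (lookahead : String) (out : Int × Int) : Prop := out = look_for_match_alt search_buffer lookahead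
instance (search_buffer : String) (lookahead : String) (out : Int × Int) : Decidable (Spec_look_for_match search_buffer lookahead out) := by unfold Spec_look_for_match; infer_instance

-- ===== CLAIM (what is proved, stated in full; the proofs are below) =====
def Claim_equal_look_for_match : Prop := ∀ (search_buffer : String) (lookahead : String), Dom_look_for_match search_buffer lookahead → Pre_look_for_match search_buffer lookahead → Spec_look_for_match search_buffer lookahead (look_for_match search_buffer lookahead)

-- ===== LEMMAS AND PROOFS =====

-- the buffer A has built by step j is the original buffer followed by the matched prefix of the
-- lookahead, and those matched characters repeat the buffer with period n; under that invariant
-- A's inner loop computes exactly B's run loop.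
lemma inner_eq_altRun (sb0 la : List Char) (hn : 0 < sb0.length) :
    ∀ k j run, la.length - j ≤ k → j ≤ la.length →
      (∀ t, t < j → la.getD t ' ' = sb0.getD (t % sb0.length) ' ') →
      (lfmInner (sb0 ++ la.take j) la 0 j run).1 = altRun sb0 la sb0.length j run := by
  intro k
  induction k with
  | zero =>
      intro j run hk hj _
      have hj' : ¬ j < la.length := by omega
      rw [lfmInner, altRun]
      rw [dif_neg (by intro h; omega), dif_neg hj']
  | succ k ih =>
      intro j run hk hj H
      by_cases hjl : j < la.length
      · have hlen : (sb0 ++ la.take j).length = sb0.length + j := by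
          simp [List.length_take]; omega
        have hget : (sb0 ++ la.take j).getD j ' ' = sb0.getD (j % sb0.length) ' ' := by
          by_cases hjn : j < sb0.length
          · rw [List.getD_append _ _ _ _ hjn, Nat.mod_eq_of_lt hjn]
          · push_neg at hjn
            have h1 : (sb0 ++ la.take j).getD j ' ' = (la.take j).getD (j - sb0.length) ' ' := by
              rw [List.getD_append_right _ _ _ _ hjn]
            have h2 : (la.take j).getD (j - sb0.length) ' ' = la.getD (j - sb0.length) ' ' := by
              have hlt2 : j - sb0.length < (la.take j).length := by
                simp [List.length_take]; omega
              have hlt3 : j - sb0.length < la.length := by omega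
              rw [List.getD_eq_getElem _ _ hlt2, List.getD_eq_getElem _ _ hlt3,
                List.getElem_take]
            have h3 : (j - sb0.length) % sb0.length = j % sb0.length := by
              conv_rhs => rw [show j = (j - sb0.length) + sb0.length by omega]
              rw [Nat.add_mod_right]
            rw [h1, h2, H _ (by omega), h3]
        rw [lfmInner, altRun]
        have hcond : j < (sb0 ++ la.take j).length ∧ j - 0 < la.length := by
          constructor
          · omega
          · simpa using hjl
        rw [dif_pos hcond, dif_pos hjl]
        simp only [Nat.sub_zero]
        rw [hget]
        by_cases heq : la.getD j ' ' = sb0.getD (j % sb0.length) ' '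
        · have hbeq : (sb0.getD (j % sb0.length) ' ' == la.getD j ' ') = true :=
            beq_iff_eq.mpr heq.symm
          have hbeq2 : (la.getD j ' ' == sb0.getD (j % sb0.length) ' ') = true :=
            beq_iff_eq.mpr heq
          rw [if_pos hbeq, if_pos hbeq2]
          have happ : sb0 ++ la.take j ++ [sb0.getD (j % sb0.length) ' '] =
              sb0 ++ la.take (j + 1) := by
            rw [List.append_assoc]
            congr 1
            rw [List.take_succ]
            congr 1
            have hsome : la[j]? = some (la.getD j ' ') := by
              rw [List.getD_eq_getElem _ _ hjl, List.getElem?_eq_getElem hjl]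
            rw [hsome, ← heq]
            rfl
          rw [happ]
          apply ih (j + 1) (run + 1) (by omega) (by omega)
          intro t ht
          by_cases htj : t < j
          · exact H t htj
          · have : t = j := by omega
            rw [this, heq]
        · have hbeq : (sb0.getD (j % sb0.length) ' ' == la.getD j ' ') = false :=
            beq_eq_false_iff_ne.mpr (fun h => heq h.symm)
          have hbeq2 : (la.getD j ' ' == sb0.getD (j % sb0.length) ' ') = false :=
            beq_eq_false_iff_ne.mpr heq
          rw [if_neg (fun h => Bool.false_ne_true (hbeq ▸ h)),
            if_neg (fun h => Bool.false_ne_true (hbeq2 ▸ h))]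
      · rw [lfmInner, altRun]
        rw [dif_neg (by intro h; omega), dif_neg hjl]

theorem look_for_match_spec : Claim_equal_look_for_match := by
  intro search_buffer lookahead _ _
  unfold Spec_look_for_match look_for_match look_for_match_alt
  simp only []
  set sb := search_buffer.toList with hsb
  set la := lookahead.toList with hla
  by_cases hempty : sb.length = 0
  · rw [if_neg (by omega), if_pos hempty]
    norm_num
  · have hn : 0 < sb.length := Nat.pos_of_ne_zero hempty
    rw [if_pos hn, if_neg hempty]
    by_cases hc : sb.getD 0 ' ' = la.getD 0 ' '
    · have hbeq : (sb.getD 0 ' ' == la.getD 0 ' ') = true := beq_iff_eq.mpr hc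
      have hbne : (sb.getD 0 ' ' != la.getD 0 ' ') = false := bne_eq_false_iff_eq.mpr hc
      rw [if_pos hbeq, if_neg (fun h => Bool.false_ne_true (hbne ▸ h))]
      have hrun : (lfmInner sb la 0 0 0).1 = altRun sb la sb.length 0 0 := by
        have := inner_eq_altRun sb la hn la.length 0 0 (by omega) (by omega)
          (by intro t ht; omega)
        simpa using this
      simp only [hrun, Nat.sub_zero]
    · have hbeq : (sb.getD 0 ' ' == la.getD 0 ' ') = false := beq_eq_false_iff_ne.mpr hc
      have hbne : (sb.getD 0 ' ' != la.getD 0 ' ') = true := bne_iff_ne.mpr hc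
      rw [if_neg (fun h => Bool.false_ne_true (hbeq ▸ h)), if_pos hbne]
      norm_num
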